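-- pv_equiv track=rewrite | github.com/kelpasa/Code_Wars_Python | 6 кю/Adjacent repeated words in a string.py | count_adjacent_pairs
-- ===== SOURCE A (Python) =====
-- def count_adjacent_pairs(st):
--     st = st.lower().split()
--     check, ret, k = None, 0, 0
--     for e in st:
--         if e == check and k:
--             continue
--         if e == check and not k:
--             ret, k = ret + 1, 1
--         else:
--             check,k = e, 0
--     return ret
-- ===== SOURCE B (Python) =====
-- def count_adjacent_pairs(st):
--     words = st.lower().split()
--     count = 0
--     while words:
--         head = words[0]
--         run_len = 1
--         while run_len < len(words) and words[run_len] == head: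
--             run_len += 1
--         if run_len >= 2:
--             count += 1
--         words = words[run_len:]
--     return count
-- ===== Notes on version B (the rewrite author's own statement) =====
-- stated objective: alternative
-- what changed: Replaces A's two-variable flag state machine over words with an explicit run decomposition: consume each maximal run of equal adjacent words at once and count runs of length >= 2.
import Mathlib
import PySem

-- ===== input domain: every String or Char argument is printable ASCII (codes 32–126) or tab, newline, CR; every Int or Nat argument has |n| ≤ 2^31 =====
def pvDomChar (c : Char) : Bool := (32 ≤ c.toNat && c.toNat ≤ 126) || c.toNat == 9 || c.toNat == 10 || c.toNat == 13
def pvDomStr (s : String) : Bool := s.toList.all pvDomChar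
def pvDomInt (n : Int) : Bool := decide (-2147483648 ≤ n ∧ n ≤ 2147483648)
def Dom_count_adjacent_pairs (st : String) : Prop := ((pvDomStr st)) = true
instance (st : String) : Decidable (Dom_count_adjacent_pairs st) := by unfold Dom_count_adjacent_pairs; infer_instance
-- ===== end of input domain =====

-- B replaces A's two-variable flag state machine with an explicit run decomposition
-- (consume each maximal run of equal adjacent words, count runs of length ≥ 2); alternative, not faster.

-- ===== PORT A =====
-- A: lowercase+split, then one pass keeping (check, ret, k); 'e == check' with check=None is False → some e = check.
def count_adjacent_pairs (st : String) : Int :=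
  let words := PySem.Str.split₀ (PySem.Str.lower st)
  (words.foldl (fun s e =>
      if some e = s.1 ∧ s.2.2 ≠ 0 then s                       -- continue
      else if some e = s.1 ∧ ¬ (s.2.2 ≠ 0) then (s.1, s.2.1 + 1, (1 : Int))
      else (some e, s.2.1, (0 : Int)))
    ((none : Option String), (0 : Int), (0 : Int))).2.1

-- ===== PORT B =====
-- inner 'while' scan of Source B = takeWhile over the tail; words = words[run_len:] = drop run_len.
def pvAltLoop : List String → Int → Int
  | [], count => count
  | head :: rest, count =>
    let run_len := 1 + (rest.takeWhile (· == head)).length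
    pvAltLoop ((head :: rest).drop run_len)
      (if run_len ≥ 2 then count + 1 else count)
termination_by ws _ => ws.length
decreasing_by
  rw [List.length_drop]
  simp only [List.length_cons]
  omega

def count_adjacent_pairs_alt (st : String) : Int :=
  pvAltLoop (PySem.Str.split₀ (PySem.Str.lower st)) 0

-- ===== PRECONDITION & SPEC =====
def Spec_count_adjacent_pairs (st : String) (out : Int) : Prop := out = count_adjacent_pairs_alt st
instance (st : String) (out : Int) : Decidable (Spec_count_adjacent_pairs st out) := by unfold Spec_count_adjacent_pairs; infer_instance

-- ===== CLAIM (what is proved, stated in full; the proofs are below) =====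
def Claim_equal_count_adjacent_pairs : Prop := ∀ (st : String), Dom_count_adjacent_pairs st → Spec_count_adjacent_pairs st (count_adjacent_pairs st)

-- ===== LEMMAS AND PROOFS =====

-- ret-delta of A's fold, as a standalone recursion
def pvCntA : Option String → Int → List String → Int
  | _, _, [] => 0
  | check, k, e :: ws =>
    if some e = check ∧ k ≠ 0 then pvCntA check k ws
    else if some e = check ∧ ¬ (k ≠ 0) then 1 + pvCntA check 1 ws
    else pvCntA (some e) 0 ws

theorem pvFoldA (ws : List String) : ∀ (check : Option String) (ret k : Int),
    (ws.foldl (fun s e =>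
      if some e = s.1 ∧ s.2.2 ≠ 0 then s
      else if some e = s.1 ∧ ¬ (s.2.2 ≠ 0) then (s.1, s.2.1 + 1, (1 : Int))
      else (some e, s.2.1, (0 : Int))) (check, ret, k)).2.1 = ret + pvCntA check k ws := by
  induction ws with
  | nil => intro check ret k; simp [pvCntA]
  | cons e ws ih =>
    intro check ret k
    simp only [List.foldl_cons, pvCntA]
    by_cases h1 : some e = check ∧ k ≠ 0
    · simp only [if_pos h1]
      rw [ih]
    · by_cases h2 : some e = check ∧ ¬ (k ≠ 0)
      · simp only [if_neg h1, if_pos h2]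
        rw [ih]; ring
      · simp only [if_neg h1, if_neg h2]
        rw [ih]

theorem pvDropTake (p : String → Bool) (l : List String) :
    l.drop (l.takeWhile p).length = l.dropWhile p := by
  nth_rewrite 2 [← List.takeWhile_append_dropWhile (p := p) (l := l)]
  rw [List.drop_left]

theorem pvMain : ∀ (n : ℕ) (ws : List String), ws.length ≤ n →
    ((∀ c, pvAltLoop ws c = c + pvAltLoop ws 0) ∧
     (∀ a, pvCntA (some a) 0 ws = pvAltLoop (a :: ws) 0) ∧
     (∀ a, pvCntA (some a) 1 ws = pvAltLoop (ws.dropWhile (· == a)) 0)) := by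
  intro n
  induction n with
  | zero =>
    intro ws hw
    have hws : ws = [] := by
      cases ws with
      | nil => rfl
      | cons a l => simp at hw
    subst hws
    exact ⟨fun c => by simp [pvAltLoop],
           fun a => by simp [pvAltLoop, pvCntA],
           fun a => by simp [pvAltLoop, pvCntA]⟩
  | succ n ih =>
    intro ws hw
    cases ws with
    | nil =>
      exact ⟨fun c => by simp [pvAltLoop],
             fun a => by simp [pvAltLoop, pvCntA],
             fun a => by simp [pvAltLoop, pvCntA]⟩
    | cons e ws' =>
      have hw' : ws'.length ≤ n := by simpa using hw
      have hdlen : ∀ p : String → Bool, (ws'.dropWhile p).length ≤ n :=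
        fun p => le_trans (List.length_dropWhile_le _ _) hw'
      refine ⟨?_, ?_, ?_⟩
      · -- accumulator lemma
        intro c
        rw [pvAltLoop, pvAltLoop]
        have hd : ((e :: ws').drop (1 + (ws'.takeWhile (· == e)).length)).length ≤ n := by
          rw [List.length_drop]; simp only [List.length_cons]; omega
        rw [(ih _ hd).1 (if 1 + (ws'.takeWhile (· == e)).length ≥ 2 then c + 1 else c),
            (ih _ hd).1 (if 1 + (ws'.takeWhile (· == e)).length ≥ 2 then (0:Int) + 1 else 0)]
        split_ifs <;> ring
      · -- pvCntA (some a) 0 (e :: ws') = pvAltLoop (a :: e :: ws') 0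
        intro a
        by_cases he : e = a
        · subst he
          have h0 : pvCntA (some e) 0 (e :: ws') = 1 + pvCntA (some e) 1 ws' := by
            simp [pvCntA]
          rw [h0, (ih _ hw').2.2 e]
          rw [pvAltLoop]
          have ht : (e :: ws').takeWhile (· == e) = e :: ws'.takeWhile (· == e) := by
            simp
          rw [ht]
          simp only [List.length_cons]
          rw [if_pos (by omega : 1 + ((ws'.takeWhile (· == e)).length + 1) ≥ 2)]
          rw [show 1 + ((ws'.takeWhile (· == e)).length + 1)
                = (ws'.takeWhile (· == e)).length + 1 + 1 from by omega]
          rw [List.drop_succ_cons, List.drop_succ_cons, pvDropTake]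
          rw [(ih _ (hdlen _)).1 ((0:Int) + 1)]
          ring
        · have hbe : (e == a) = false := by simp [he]
          have h0 : pvCntA (some a) 0 (e :: ws') = pvCntA (some e) 0 ws' := by
            simp [pvCntA, he]
          rw [h0, (ih _ hw').2.1 e]
          conv_rhs => rw [pvAltLoop]
          have ht : (e :: ws').takeWhile (· == a) = [] := by
            simp [hbe]
          rw [ht]
          simp [List.drop_one]
      · -- pvCntA (some a) 1 (e :: ws') = pvAltLoop (dropWhile (· == a) (e :: ws')) 0
        intro a
        by_cases he : e = a
        · subst he
          have h0 : pvCntA (some e) 1 (e :: ws') = pvCntA (some e) 1 ws' := by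
            simp [pvCntA]
          rw [h0, (ih _ hw').2.2 e]
          simp
        · have hbe : (e == a) = false := by simp [he]
          have h0 : pvCntA (some a) 1 (e :: ws') = pvCntA (some e) 0 ws' := by
            simp [pvCntA, he]
          rw [h0, (ih _ hw').2.1 e]
          simp [hbe]

theorem pvNone (ws : List String) : pvCntA none 0 ws = pvAltLoop ws 0 := by
  cases ws with
  | nil => simp [pvCntA, pvAltLoop]
  | cons e ws' =>
    have h0 : pvCntA none 0 (e :: ws') = pvCntA (some e) 0 ws' := by simp [pvCntA]
    rw [h0, (pvMain ws'.length ws' le_rfl).2.1 e]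

-- ===== VERDICT (by name: the statement is the Claim_ definition above) =====
theorem count_adjacent_pairs_spec : Claim_equal_count_adjacent_pairs := by
  intro st _
  unfold Spec_count_adjacent_pairs count_adjacent_pairs count_adjacent_pairs_alt
  rw [pvFoldA, pvNone]
  ring
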